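-- pv_equiv track=rewrite | github.com/mosahle7/DSA_Python | numberTheory/isSumOf2Primes.py | isSumOfTwo
-- ===== SOURCE A (Python) =====
-- def isSumOfTwo (N):
--     def prime(n):
--         for i in range(2,int(n**0.5)+1):
--             if n%i==0:
--               return False
--         return True
--     if N<=3: return "No"
--     elif N%2==0: return "Yes"
--
--     else:
--         if prime(N-2): return "Yes"
--
--     return "No"
-- ===== SOURCE B (Python) =====
-- def isSumOfTwo(N):
--     if N <= 3:
--         return "No"
--     if N % 2 == 0:
--         return "Yes"
--     m = N - 2
--     s = int(m ** 0.5)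
--     # Sieve of Eratosthenes up to isqrt(m), then trial-divide m by sieve primes only
--     sieve = [True] * (s + 1)
--     i = 2
--     while i * i <= s:
--         for j in range(i * i, s + 1, i):
--             sieve[j] = False
--         i += 1
--     for p in range(2, s + 1):
--         if sieve[p] and m % p == 0:
--             return "No"
--     return "Yes"
-- ===== Notes on version B (the rewrite author's own statement) =====
-- stated objective: alternative
-- what changed: B replaces A's direct trial division over all integers 2..isqrt(N-2) with a Sieve of Eratosthenes up to isqrt(N-2) followed by trial division of N-2 by the sieve primes only.
import Mathlib
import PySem

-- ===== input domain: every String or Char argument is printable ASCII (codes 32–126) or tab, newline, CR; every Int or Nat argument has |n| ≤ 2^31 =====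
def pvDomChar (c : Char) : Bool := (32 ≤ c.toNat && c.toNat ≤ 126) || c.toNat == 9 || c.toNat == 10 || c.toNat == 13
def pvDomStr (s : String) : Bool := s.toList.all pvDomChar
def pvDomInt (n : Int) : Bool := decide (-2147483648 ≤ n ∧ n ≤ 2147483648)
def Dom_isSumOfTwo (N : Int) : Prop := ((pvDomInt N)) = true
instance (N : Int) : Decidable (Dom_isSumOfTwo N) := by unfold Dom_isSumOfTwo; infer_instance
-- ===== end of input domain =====

-- B replaces A's trial division over 2..isqrt(N-2) with a sieve of Eratosthenes up to
-- isqrt(N-2) followed by trial division by the sieve primes only (objective: alternative).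

-- ===== PORT A =====
-- `int(n**0.5)`: exact as Nat.sqrt on the domain |N| ≤ 2^31 (double sqrt is correctly
-- rounded and the true root is far from the next integer there); n = N-2 ≥ 2 when called.
-- prime(n)'s for-loop with early return, as structural recursion over the range list
def pvTrialA (n : Int) : List Int → Bool
  | [] => true
  | i :: rest => if PySem.Int.mod n i = 0 then false else pvTrialA n rest

def pvPrimeA (n : Int) : Bool :=
  pvTrialA n (PySem.List.pyRange 2 ((n.toNat.sqrt : Int) + 1) 1)

def isSumOfTwo (N : Int) : String :=
  if N ≤ 3 then "No"
  else if PySem.Int.mod N 2 = 0 then "Yes"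
  else if pvPrimeA (N - 2) then "Yes" else "No"

-- ===== PORT B =====
-- inner `for j in range(i*i, s+1, i): sieve[j] = False`
def pvMark (sv : List Bool) (i s : Nat) : List Bool :=
  (PySem.List.pyRange ((i * i : Nat) : Int) (((s : Int)) + 1) (i : Int)).foldl
    (fun a j => a.set j.toNat false) sv

-- outer `while i*i <= s: …; i += 1`
def pvSieveLoop (s : Nat) (sv : List Bool) (i : Nat) : List Bool :=
  if _h : i * i ≤ s then pvSieveLoop s (pvMark sv i s) (i + 1) else sv
termination_by s + 1 - i
decreasing_by
  rcases Nat.eq_zero_or_pos i with rfl | hp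
  · omega
  · have h2 : i ≤ i * i := Nat.le_mul_of_pos_left i hp
    omega

-- final scan `for p in range(2, s+1): if sieve[p] and m % p == 0: return "No"`, with early return
def pvScanB (sv : List Bool) (m : Nat) : List Int → String
  | [] => "Yes"
  | p :: rest =>
      if sv.getD p.toNat false ∧ m % p.toNat = 0 then "No" else pvScanB sv m rest

def isSumOfTwo_alt (N : Int) : String :=
  if N ≤ 3 then "No"
  else if PySem.Int.mod N 2 = 0 then "Yes"
  else
    -- here N - 2 ≥ 3, so working in Nat is exact; s = int(m**0.5) = Nat.sqrt m on the domain
    let m : Nat := (N - 2).toNat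
    let s : Nat := m.sqrt
    let sieve := pvSieveLoop s (List.replicate (s + 1) true) 2
    pvScanB sieve m (PySem.List.pyRange 2 ((s : Int) + 1) 1)

-- ===== PRECONDITION & SPEC =====
def Spec_isSumOfTwo (N : Int) (out : String) : Prop := out = isSumOfTwo_alt N
instance (N : Int) (out : String) : Decidable (Spec_isSumOfTwo N out) := by unfold Spec_isSumOfTwo; infer_instance

-- ===== CLAIM (what is proved, stated in full; the proofs are below) =====
def Claim_equal_isSumOfTwo : Prop := ∀ (N : Int), Dom_isSumOfTwo N → Spec_isSumOfTwo N (isSumOfTwo N)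

-- ===== LEMMAS AND PROOFS =====

-- A's trial loop returns true iff no divisor in the list
theorem pvTrialA_eq_true (n : Int) (js : List Int) :
    pvTrialA n js = true ↔ ∀ i ∈ js, ¬ PySem.Int.mod n i = 0 := by
  induction js with
  | nil => simp [pvTrialA]
  | cons j rest ih => by_cases h : PySem.Int.mod n j = 0 <;> simp [pvTrialA, h, ih]

-- setting an index to false, read through getD false
theorem getD_set_false (sv : List Bool) (q p : Nat) :
    (sv.set q false).getD p false = (sv.getD p false && !(q == p)) := by
  by_cases hqp : q = p
  · subst hqp
    by_cases hlen : q < sv.length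
    · simp [List.getD, hlen]
    · simp [List.getD, hlen]
  · simp [List.getD, List.getElem?_set_ne hqp, hqp]

theorem foldl_set_false_getD (js : List Int) (sv : List Bool) (p : Nat) :
    ((js.foldl (fun a j => a.set j.toNat false) sv).getD p false) =
      (sv.getD p false && !(js.any (fun j => j.toNat == p))) := by
  induction js generalizing sv with
  | nil => simp
  | cons j rest ih =>
      simp only [List.foldl_cons, List.any_cons, ih, getD_set_false]
      cases (j.toNat == p) <;> cases sv.getD p false <;> simp

theorem pvMark_getD (sv : List Bool) (i s p : Nat) (hi : 2 ≤ i) :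
    (pvMark sv i s).getD p false =
      (sv.getD p false && !decide (i * i ≤ p ∧ p ≤ s ∧ i ∣ p)) := by
  rw [pvMark, foldl_set_false_getD]
  congr 1
  congr 1
  rw [Bool.eq_iff_iff]
  simp only [List.any_eq_true, beq_iff_eq, decide_eq_true_eq]
  constructor
  · rintro ⟨j, hj, rfl⟩
    rw [PySem.List.mem_pyRange_iff_of_pos (by positivity)] at hj
    obtain ⟨h1, h2, k, hk⟩ := hj
    have hj0 : (0:Int) ≤ j := le_trans (by positivity) h1
    refine ⟨by omega, by omega, ?_⟩
    have hdj : (i : Int) ∣ j := ⟨(i : Int) + k, by push_cast at hk ⊢; linarith⟩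
    have hj' : ((j.toNat : Nat) : Int) = j := Int.toNat_of_nonneg hj0
    exact_mod_cast hj' ▸ hdj
  · rintro ⟨h1, h2, hd⟩
    refine ⟨(p : Int), ?_, by simp⟩
    rw [PySem.List.mem_pyRange_iff_of_pos (by positivity)]
    refine ⟨by exact_mod_cast h1, by exact_mod_cast (by omega : (p:Int) < (s:Int) + 1), ?_⟩
    obtain ⟨k, hk⟩ := hd
    exact ⟨(k : Int) - (i : Int), by push_cast [hk]; ring⟩

theorem pvSieveLoop_getD (s : Nat) (sv : List Bool) (i p : Nat) (hi : 2 ≤ i) :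
    ((pvSieveLoop s sv i).getD p false = true) ↔
      (sv.getD p false = true ∧
        ¬ ∃ k, i ≤ k ∧ k * k ≤ s ∧ k * k ≤ p ∧ p ≤ s ∧ k ∣ p) := by
  unfold pvSieveLoop
  by_cases h : i * i ≤ s
  · simp only [h, dif_pos]
    rw [pvSieveLoop_getD s (pvMark sv i s) (i + 1) p (by omega),
        pvMark_getD sv i s p hi]
    simp only [Bool.and_eq_true, Bool.not_eq_eq_eq_not, Bool.not_true,
      decide_eq_false_iff_not]
    constructor
    · rintro ⟨⟨h1, h2⟩, h3⟩
      refine ⟨h1, ?_⟩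
      rintro ⟨k, hk1, hk2, hk3, hk4, hk5⟩
      rcases Nat.eq_or_lt_of_le hk1 with rfl | hlt
      · exact h2 ⟨hk3, hk4, hk5⟩
      · exact h3 ⟨k, by omega, hk2, hk3, hk4, hk5⟩
    · rintro ⟨h1, hno⟩
      exact ⟨⟨h1, fun ⟨a, b, c⟩ => hno ⟨i, le_refl i, h, a, b, c⟩⟩,
        fun ⟨k, hk1, hk2, hk3, hk4, hk5⟩ => hno ⟨k, by omega, hk2, hk3, hk4, hk5⟩⟩
  · simp only [h, dif_neg, not_false_iff]
    have hno : ¬ ∃ k, i ≤ k ∧ k * k ≤ s ∧ k * k ≤ p ∧ p ≤ s ∧ k ∣ p := by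
      rintro ⟨k, hk1, hk2, -⟩
      exact h (le_trans (Nat.mul_le_mul hk1 hk1) hk2)
    simp [hno]
termination_by s + 1 - i
decreasing_by
  have h2 : i ≤ i * i := Nat.le_mul_of_pos_left i (by omega)
  omega

-- the final sieve entry p (2 ≤ p ≤ s) is true iff p is prime
theorem sieve_prime (s p : Nat) (hp2 : 2 ≤ p) (hps : p ≤ s) :
    ((pvSieveLoop s (List.replicate (s + 1) true) 2).getD p false = true) ↔ p.Prime := by
  rw [pvSieveLoop_getD s _ 2 p (le_refl 2)]
  have hrep : (List.replicate (s + 1) true).getD p false = true := by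
    simp [List.getD, Nat.lt_succ_of_le hps]
  rw [hrep]
  simp only [true_and]
  constructor
  · intro hno
    rw [Nat.prime_def_lt]
    refine ⟨hp2, fun d hdlt hdvd => ?_⟩
    by_contra hd1
    have hd2 : 2 ≤ d := by
      rcases Nat.eq_zero_or_pos d with rfl | hdpos
      · obtain ⟨e, he⟩ := hdvd; omega
      · omega
    obtain ⟨e, he⟩ := hdvd
    have he2 : 2 ≤ e := by nlinarith
    rcases le_total d e with hde | hde
    · exact hno ⟨d, hd2, by nlinarith, by nlinarith, hps, ⟨e, he⟩⟩
    · exact hno ⟨e, he2, by nlinarith, by nlinarith, hps, ⟨d, by rw [he]; ring⟩⟩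
  · rintro hprime ⟨k, hk1, hk2, hk3, hk4, hk5⟩
    rcases (Nat.Prime.eq_one_or_self_of_dvd hprime k hk5) with rfl | rfl
    · omega
    · nlinarith

-- B's scan returns "No" iff some listed index is a live sieve entry dividing m
theorem pvScanB_eq (sv : List Bool) (m : Nat) (js : List Int) :
    pvScanB sv m js = (if ∃ p ∈ js, sv.getD p.toNat false = true ∧ m % p.toNat = 0
                       then "No" else "Yes") := by
  induction js with
  | nil => simp [pvScanB]
  | cons j rest ih =>
      by_cases h : sv.getD j.toNat false = true ∧ m % j.toNat = 0
      · rw [pvScanB, if_pos (by exact_mod_cast h),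
            if_pos ⟨j, List.mem_cons_self, h⟩]
      · rw [pvScanB, if_neg (by exact_mod_cast h), ih]
        by_cases hr : ∃ p ∈ rest, sv.getD p.toNat false = true ∧ m % p.toNat = 0
        · rw [if_pos hr, if_pos (hr.imp fun p hp => ⟨List.mem_cons_of_mem j hp.1, hp.2⟩)]
        · rw [if_neg hr, if_neg ?_]
          rintro ⟨p, hp, hc⟩
          rcases List.mem_cons.mp hp with rfl | hp'
          · exact h hc
          · exact hr ⟨p, hp', hc⟩

-- a divisor 2 ≤ d ≤ sqrt m exists iff a PRIME divisor ≤ sqrt m exists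
theorem divisor_iff_prime_divisor (m : Nat) :
    (∃ d, 2 ≤ d ∧ d ≤ m.sqrt ∧ d ∣ m) ↔ (∃ p, p.Prime ∧ p ≤ m.sqrt ∧ p ∣ m) := by
  constructor
  · rintro ⟨d, hd2, hds, hdm⟩
    exact ⟨d.minFac, Nat.minFac_prime (by omega),
      le_trans (Nat.minFac_le (by omega)) hds, dvd_trans (Nat.minFac_dvd d) hdm⟩
  · rintro ⟨p, hp, hps, hpm⟩
    exact ⟨p, hp.two_le, hps, hpm⟩

theorem isSumOfTwo_spec_aux (N : Int) (h3 : ¬ N ≤ 3) (hodd : ¬ PySem.Int.mod N 2 = 0) :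
    isSumOfTwo N = isSumOfTwo_alt N := by
  rw [isSumOfTwo, isSumOfTwo_alt, if_neg h3, if_neg h3, if_neg hodd, if_neg hodd]
  obtain ⟨m, hmN, hm2⟩ : ∃ m : Nat, N - 2 = (m : Int) ∧ 2 ≤ m :=
    ⟨(N - 2).toNat, by omega, by omega⟩
  rw [hmN]
  show (if pvPrimeA (m : Int) = true then "Yes" else "No") =
      pvScanB (pvSieveLoop m.sqrt (List.replicate (m.sqrt + 1) true) 2) m
        (PySem.List.pyRange 2 ((m.sqrt : Int) + 1) 1)
  have hA : pvPrimeA (m : Int) = true ↔ ¬ ∃ d, 2 ≤ d ∧ d ≤ m.sqrt ∧ d ∣ m := by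
    rw [pvPrimeA, pvTrialA_eq_true]
    simp only [Int.toNat_natCast]
    constructor
    · rintro hall ⟨d, hd2, hds, hdm⟩
      refine hall (d : Int) ?_ ?_
      · rw [PySem.List.mem_pyRange_one]
        exact ⟨by exact_mod_cast hd2, by exact_mod_cast Nat.lt_succ_of_le hds⟩
      · rw [PySem.Int.mod_eq_zero_iff_dvd]
        exact_mod_cast hdm
    · intro hno i hi hmod
      rw [PySem.List.mem_pyRange_one] at hi
      rw [PySem.Int.mod_eq_zero_iff_dvd] at hmod
      refine hno ⟨i.toNat, by omega, by omega, ?_⟩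
      have hcast : ((i.toNat : Nat) : Int) ∣ (m : Int) := by
        rwa [Int.toNat_of_nonneg (by omega)]
      exact_mod_cast hcast
  rw [pvScanB_eq]
  have hB : (∃ p ∈ PySem.List.pyRange 2 ((m.sqrt : Int) + 1) 1,
        (pvSieveLoop m.sqrt (List.replicate (m.sqrt + 1) true) 2).getD p.toNat false = true ∧
          m % p.toNat = 0) ↔ ∃ d, 2 ≤ d ∧ d ≤ m.sqrt ∧ d ∣ m := by
    rw [divisor_iff_prime_divisor]
    constructor
    · rintro ⟨p, hp, hlive, hmod⟩
      rw [PySem.List.mem_pyRange_one] at hp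
      have hp2 : 2 ≤ p.toNat := by omega
      have hps : p.toNat ≤ m.sqrt := by omega
      exact ⟨p.toNat, (sieve_prime m.sqrt p.toNat hp2 hps).mp hlive, hps,
        Nat.dvd_of_mod_eq_zero hmod⟩
    · rintro ⟨p, hprime, hps, hpm⟩
      refine ⟨(p : Int), ?_, ?_, ?_⟩
      · rw [PySem.List.mem_pyRange_one]
        exact ⟨by exact_mod_cast hprime.two_le, by exact_mod_cast Nat.lt_succ_of_le hps⟩
      · rw [Int.toNat_natCast]
        exact (sieve_prime m.sqrt p hprime.two_le hps).mpr hprime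
      · rw [Int.toNat_natCast]
        exact Nat.mod_eq_zero_of_dvd hpm
  by_cases hdiv : ∃ d, 2 ≤ d ∧ d ≤ m.sqrt ∧ d ∣ m
  · rw [if_pos (hB.mpr hdiv), if_neg (by simpa [hA] using hdiv)]
  · rw [if_neg (fun hc => hdiv (hB.mp hc)), if_pos (hA.mpr hdiv)]

-- ===== VERDICT (by name: the statement is the Claim_ definition above) =====
theorem isSumOfTwo_spec : Claim_equal_isSumOfTwo := by
  intro N _
  unfold Spec_isSumOfTwo
  by_cases h3 : N ≤ 3
  · rw [isSumOfTwo, isSumOfTwo_alt, if_pos h3, if_pos h3]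
  · by_cases he : PySem.Int.mod N 2 = 0
    · rw [isSumOfTwo, isSumOfTwo_alt, if_neg h3, if_neg h3, if_pos he, if_pos he]
    · exact isSumOfTwo_spec_aux N h3 he
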